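-- pv_equiv track=rewrite | github.com/CTRL-ALT-OP/Word-Analyzer | word analysis.py | get_assignment
-- ===== SOURCE A (Python) =====
-- def get_assignment(word, dictionary):
--     for _ in range(3):
--         for target, words in dictionary.items():
--             if word in words:
--                 return target
--         if word.endswith("es"):
--             word = word[:-2]
--         elif word.endswith("s"):
--             word = word[:-1]
--     return None
-- ===== SOURCE B (Python) =====
-- def _trim(w):
--     if w.endswith("es"):
--         return w[:-2]
--     if w.endswith("s"):
--         return w[:-1]
--     return w
--
--
-- def get_assignment(word, dictionary):
--     index = {}
--     for target, words in dictionary.items():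
--         for w in words:
--             index.setdefault(w, target)
--     c1 = _trim(word)
--     c2 = _trim(c1)
--     for c in (word, c1, c2):
--         if c in index:
--             return index[c]
--     return None
-- ===== Notes on version B (the rewrite author's own statement) =====
-- stated objective: alternative
-- what changed: B replaces A's up-to-three scans of the dictionary with a single pass that builds a first-wins reverse word-to-target index (dict.setdefault), then looks up the three candidate forms (word, trimmed once, trimmed twice) directly.
import Mathlib
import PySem

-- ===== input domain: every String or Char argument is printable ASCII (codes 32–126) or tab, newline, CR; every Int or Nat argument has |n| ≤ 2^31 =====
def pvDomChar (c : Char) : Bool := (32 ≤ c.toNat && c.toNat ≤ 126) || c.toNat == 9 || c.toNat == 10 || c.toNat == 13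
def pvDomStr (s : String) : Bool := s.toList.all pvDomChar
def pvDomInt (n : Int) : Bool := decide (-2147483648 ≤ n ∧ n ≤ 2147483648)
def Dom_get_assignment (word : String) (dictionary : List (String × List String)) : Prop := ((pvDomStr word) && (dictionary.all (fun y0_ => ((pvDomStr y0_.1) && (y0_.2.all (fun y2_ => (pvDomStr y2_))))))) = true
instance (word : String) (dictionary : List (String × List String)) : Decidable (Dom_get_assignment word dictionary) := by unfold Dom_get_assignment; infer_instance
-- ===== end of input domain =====

-- B builds a first-wins reverse index once and looks the three candidate forms up directly,
-- instead of A's up-to-three full scans of the dictionary (objective: alternative).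

-- ===== PORT A =====
-- inner loop: 'for target, words in dictionary.items(): if word in words: return target'
def gaScan (word : String) : List (String × List String) → Option String
  | [] => none
  | (target, words) :: rest =>
      if word ∈ words then some target else gaScan word rest

-- the suffix-trimming tail of each round of A's 'for _ in range(3)' loop
def gaTrim (word : String) : String :=
  if PySem.Str.endswith word "es" then PySem.Str.slice word none (some (-2))
  else if PySem.Str.endswith word "s" then PySem.Str.slice word none (some (-1))
  else word

-- 'for _ in range(3)' with the early return, as fuel recursion over the mutated word
def gaGo : Nat → String → List (String × List String) → Option String
  | 0, _, _ => none
  | Nat.succ n, word, dictionary =>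
      match gaScan word dictionary with
      | some target => some target
      | none => gaGo n (gaTrim word) dictionary

def get_assignment (word : String) (dictionary : List (String × List String)) : Option String :=
  gaGo 3 word dictionary

-- ===== PORT B =====
-- Source B's _trim
def gbTrim (w : String) : String :=
  if PySem.Str.endswith w "es" then PySem.Str.slice w none (some (-2))
  else if PySem.Str.endswith w "s" then PySem.Str.slice w none (some (-1))
  else w

-- 'index = {}; for target, words in dictionary.items(): for w in words: index.setdefault(w, target)'
def gbIndex (dictionary : List (String × List String)) : PySem.Dict String String :=
  dictionary.foldl
    (fun index p => p.2.foldl (fun index w => index.setdefault w p.1) index)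
    PySem.Dict.empty

def get_assignment_alt (word : String) (dictionary : List (String × List String)) : Option String :=
  let index := gbIndex dictionary
  let c1 := gbTrim word
  let c2 := gbTrim c1
  -- 'for c in (word, c1, c2): if c in index: return index[c]' / 'return None'
  match index.get? word with
  | some t => some t
  | none =>
    match index.get? c1 with
    | some t => some t
    | none => index.get? c2

-- ===== PRECONDITION & SPEC =====
def Spec_get_assignment (word : String) (dictionary : List (String × List String)) (out : Option String) : Prop := out = get_assignment_alt word dictionary
instance (word : String) (dictionary : List (String × List String)) (out : Option String) : Decidable (Spec_get_assignment word dictionary out) := by unfold Spec_get_assignment; infer_instance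

-- ===== CLAIM (what is proved, stated in full; the proofs are below) =====
def Claim_equal_get_assignment : Prop := ∀ (word : String) (dictionary : List (String × List String)), Dom_get_assignment word dictionary → Spec_get_assignment word dictionary (get_assignment word dictionary)

-- ===== LEMMAS AND PROOFS =====

-- a setdefault loop over one word list, looked up afterwards
theorem get?_setdefault_foldl (words : List String) (t : String)
    (d : PySem.Dict String String) (c : String) :
    (words.foldl (fun d w => d.setdefault w t) d).get? c
      = (d.get? c).or (if c ∈ words then some t else none) := by
  induction words generalizing d with
  | nil => simp
  | cons w ws ih =>
    simp only [List.foldl_cons, ih, List.mem_cons]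
    by_cases hw : c = w
    · subst hw
      rw [PySem.Dict.get?_setdefault_self d c t]
      cases hd : d.get? c <;> simp
    · rw [PySem.Dict.get?_setdefault_of_ne d t hw]
      simp [hw]

-- the whole index build, looked up afterwards: first matching target wins, as in A's scan
theorem get?_index_foldl (dictionary : List (String × List String))
    (d : PySem.Dict String String) (c : String) :
    (dictionary.foldl
        (fun index p => p.2.foldl (fun index w => index.setdefault w p.1) index) d).get? c
      = (d.get? c).or (gaScan c dictionary) := by
  induction dictionary generalizing d with
  | nil => simp [gaScan]
  | cons p rest ih =>
    simp only [List.foldl_cons, ih, get?_setdefault_foldl, gaScan]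
    cases hd : d.get? c <;> by_cases hc : c ∈ p.2 <;> simp [hc]

theorem get?_gbIndex (dictionary : List (String × List String)) (c : String) :
    (gbIndex dictionary).get? c = gaScan c dictionary := by
  simp [gbIndex, get?_index_foldl]

-- ===== VERDICT (by name: the statement is the Claim_ definition above) =====
theorem get_assignment_spec : Claim_equal_get_assignment := by
  intro word dictionary _
  show get_assignment word dictionary = get_assignment_alt word dictionary
  simp only [get_assignment, get_assignment_alt, gaGo, get?_gbIndex]
  have htrim : gbTrim = gaTrim := rfl
  rw [htrim]
  cases gaScan word dictionary <;>
    cases gaScan (gaTrim word) dictionary <;>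
      cases gaScan (gaTrim (gaTrim word)) dictionary <;> rfl
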